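-- pv_equiv track=rewrite | github.com/ugurrates/CABTA | src/analyzers/office_analyzer.py | _parse_oleobj
-- ===== SOURCE A (Python) =====
-- from typing import Dict, List
--
-- def _parse_oleobj(output: str) -> List[Dict]:
--     """Parse oleobj output."""
--     objects = []
--
--     current_obj = {}
--     for line in output.split('\n'):
--         line = line.strip()
--         if 'Object type:' in line:
--             if current_obj:
--                 objects.append(current_obj)
--             current_obj = {'type': line.split(':')[-1].strip()}
--         elif 'Object name:' in line:
--             current_obj['name'] = line.split(':')[-1].strip()
--         elif 'Saved to file:' in line:
--             current_obj['saved_path'] = line.split(':')[-1].strip()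
--
--     if current_obj:
--         objects.append(current_obj)
--
--     return objects
-- ===== SOURCE B (Python) =====
-- def _field(line):
--     return line.split(':')[-1].strip()
--
--
-- def _scan(obj, lines):
--     for ln in lines:
--         if 'Object name:' in ln:
--             obj['name'] = _field(ln)
--         elif 'Saved to file:' in ln:
--             obj['saved_path'] = _field(ln)
--     return obj
--
--
-- def _parse_oleobj(output):
--     """Parse oleobj output: partition the lines into segments delimited by
--     'Object type:' header lines, then build one dict per segment."""
--     segments = [[]]
--     for ln in output.split('\n'):
--         ln = ln.strip()
--         if 'Object type:' in ln:
--             segments.append([ln])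
--         else:
--             segments[-1].append(ln)
--     objects = []
--     pre = _scan({}, segments[0])
--     if pre:
--         objects.append(pre)
--     for seg in segments[1:]:
--         objects.append(_scan({'type': _field(seg[0])}, seg[1:]))
--     return objects
-- ===== Notes on version B (the rewrite author's own statement) =====
-- stated objective: alternative
-- what changed: Replaces A's running current_obj state machine with a split-then-build pass: the lines are first partitioned into segments delimited by 'Object type:' header lines, then each segment is independently mapped to its dict.
import Mathlib
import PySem

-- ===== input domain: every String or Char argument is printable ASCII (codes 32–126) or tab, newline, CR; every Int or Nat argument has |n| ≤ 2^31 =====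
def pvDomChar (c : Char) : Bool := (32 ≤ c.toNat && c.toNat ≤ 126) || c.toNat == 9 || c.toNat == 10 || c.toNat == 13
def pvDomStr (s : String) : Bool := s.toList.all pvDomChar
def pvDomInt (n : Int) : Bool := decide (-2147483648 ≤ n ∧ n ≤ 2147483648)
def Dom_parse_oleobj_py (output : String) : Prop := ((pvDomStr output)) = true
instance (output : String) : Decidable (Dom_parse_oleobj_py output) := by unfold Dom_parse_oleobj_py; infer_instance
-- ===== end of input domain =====

-- B replaces A's running current_obj state machine with a split-into-segments-then-build-each pass (alternative decomposition, same cost).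

-- output.split('\n')  (the separator "\n" is nonempty, so split? is always `some`)
def pvLines (output : String) : List String :=
  (PySem.Str.split? output "\n").getD []

-- line.split(':')[-1].strip()  (split(':') is never empty, so [-1] never raises)
def pvField (l : String) : String :=
  PySem.Str.strip (PySem.List.pyGetD ((PySem.Str.split? l ":").getD []) (-1) "")

-- ===== PORT A =====
-- 'if current_obj: objects.append(current_obj)' applied to the state
def pvFinish (st : List (PySem.Dict String String) × PySem.Dict String String) :
    List (PySem.Dict String String) :=
  if st.2.items = [] then st.1 else st.1 ++ [st.2]

-- loop body of A: state = (objects, current_obj)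
def pvStepA (st : List (PySem.Dict String String) × PySem.Dict String String) (line : String) :
    List (PySem.Dict String String) × PySem.Dict String String :=
  let l := PySem.Str.strip line
  if PySem.Str.isIn "Object type:" l then
    (pvFinish st, PySem.Dict.empty.insert "type" (pvField l))
  else if PySem.Str.isIn "Object name:" l then
    (st.1, st.2.insert "name" (pvField l))
  else if PySem.Str.isIn "Saved to file:" l then
    (st.1, st.2.insert "saved_path" (pvField l))
  else st

def parse_oleobj_py (output : String) : List (List (String × String)) :=
  (pvFinish ((pvLines output).foldl pvStepA ([], PySem.Dict.empty))).map PySem.Dict.items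

-- ===== PORT B =====
-- body of B's _scan loop (lines in a segment are already stripped)
def pvScanLine (d : PySem.Dict String String) (l : String) : PySem.Dict String String :=
  if PySem.Str.isIn "Object name:" l then d.insert "name" (pvField l)
  else if PySem.Str.isIn "Saved to file:" l then d.insert "saved_path" (pvField l)
  else d

-- _scan(obj, lines)
def pvScan (d : PySem.Dict String String) (ls : List String) : PySem.Dict String String :=
  ls.foldl pvScanLine d

-- segment-building loop body: open a new segment at a type line, else append to segments[-1]
def pvAddSeg (segs : List (List String)) (ln : String) : List (List String) :=
  let l := PySem.Str.strip ln
  if PySem.Str.isIn "Object type:" l then segs ++ [[l]]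
  else segs.dropLast ++ [segs.getLastD [] ++ [l]]

-- _scan({'type': _field(seg[0])}, seg[1:]).items  (seg is nonempty by construction, so seg[0] never raises)
def pvSegObj (seg : List String) : List (String × String) :=
  (pvScan (PySem.Dict.empty.insert "type" (pvField (seg.headD ""))) (seg.drop 1)).items

def parse_oleobj_py_alt (output : String) : List (List (String × String)) :=
  match (pvLines output).foldl pvAddSeg [[]] with
  | [] => []  -- unreachable: the fold starts from [[]] and never shrinks
  | pre :: rest =>
    let p := pvScan PySem.Dict.empty pre
    (if p.items = [] then [] else [p.items]) ++ rest.map pvSegObj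

-- ===== PRECONDITION & SPEC =====
def Spec_parse_oleobj_py (output : String) (out : List (List (String × String))) : Prop := out = parse_oleobj_py_alt output
instance (output : String) (out : List (List (String × String))) : Decidable (Spec_parse_oleobj_py output out) := by unfold Spec_parse_oleobj_py; infer_instance

-- ===== CLAIM (what is proved, stated in full; the proofs are below) =====
def Claim_equal_parse_oleobj_py : Prop := ∀ (output : String), Dom_parse_oleobj_py output → Spec_parse_oleobj_py output (parse_oleobj_py output)

-- ===== LEMMAS AND PROOFS =====

-- the typed dict {'type': _field(l)}
def pvTyped (l : String) : PySem.Dict String String := PySem.Dict.empty.insert "type" (pvField l)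

-- what B's segment fold produces after the currently open (last) segment `seg`
def pvSegsFrom (seg : List String) : List String → List (List String)
  | [] => [seg]
  | l :: rest =>
    if PySem.Str.isIn "Object type:" (PySem.Str.strip l) then
      seg :: pvSegsFrom [PySem.Str.strip l] rest
    else pvSegsFrom (seg ++ [PySem.Str.strip l]) rest

-- what A's fold contributes beyond the already-closed objects, given the current dict
def pvCloseA (cur : PySem.Dict String String) : List String → List (PySem.Dict String String)
  | [] => if cur.items = [] then [] else [cur]
  | l :: rest =>
    if PySem.Str.isIn "Object type:" (PySem.Str.strip l) then
      (if cur.items = [] then [] else [cur]) ++ pvCloseA (pvTyped (PySem.Str.strip l)) rest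
    else pvCloseA (pvScanLine cur (PySem.Str.strip l)) rest

def pvBuild (segs : List (List String)) : List (List (String × String)) :=
  match segs with
  | [] => []
  | pre :: rest =>
    (if (pvScan PySem.Dict.empty pre).items = [] then [] else [(pvScan PySem.Dict.empty pre).items])
      ++ rest.map pvSegObj

theorem pvFinish_eq (objs : List (PySem.Dict String String)) (cur : PySem.Dict String String) :
    pvFinish (objs, cur) = objs ++ (if cur.items = [] then [] else [cur]) := by
  unfold pvFinish
  split <;> simp

theorem pvFoldA (ls : List String) : ∀ (objs : List (PySem.Dict String String)) (cur : PySem.Dict String String),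
    pvFinish (ls.foldl pvStepA (objs, cur)) = objs ++ pvCloseA cur ls := by
  induction ls with
  | nil => intro objs cur; simp [pvCloseA, pvFinish_eq]
  | cons l rest ih =>
    intro objs cur
    simp only [List.foldl_cons, pvCloseA]
    by_cases ht : PySem.Str.isIn "Object type:" (PySem.Str.strip l) = true
    · rw [show pvStepA (objs, cur) l = (pvFinish (objs, cur), pvTyped (PySem.Str.strip l)) by
        simp only [pvStepA, pvTyped]; rw [if_pos ht]]
      rw [ih, if_pos ht, pvFinish_eq, List.append_assoc]
    · rw [show pvStepA (objs, cur) l = (objs, pvScanLine cur (PySem.Str.strip l)) by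
        simp only [pvStepA, pvScanLine]
        rw [if_neg ht]
        split
        · rfl
        · split <;> rfl]
      rw [ih, if_neg ht]

theorem pvFoldB (ls : List String) : ∀ (segs : List (List String)) (seg : List String),
    ls.foldl pvAddSeg (segs ++ [seg]) = segs ++ pvSegsFrom seg ls := by
  induction ls with
  | nil => intro segs seg; simp [pvSegsFrom]
  | cons l rest ih =>
    intro segs seg
    simp only [List.foldl_cons, pvSegsFrom]
    by_cases ht : PySem.Str.isIn "Object type:" (PySem.Str.strip l) = true
    · rw [show pvAddSeg (segs ++ [seg]) l = (segs ++ [seg]) ++ [[PySem.Str.strip l]] by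
        simp only [pvAddSeg]; rw [if_pos ht]]
      rw [ih, if_pos ht]
      simp
    · rw [show pvAddSeg (segs ++ [seg]) l = segs ++ [seg ++ [PySem.Str.strip l]] by
        simp only [pvAddSeg]; rw [if_neg ht]; simp]
      rw [ih, if_neg ht]

theorem pvItems_insert_ne_nil (d : PySem.Dict String String) (k v : String) :
    (d.insert k v).items ≠ [] := by
  rw [PySem.Dict.items_insert]
  split
  · rename_i h
    intro hnil
    rw [List.map_eq_nil_iff] at hnil
    rw [PySem.Dict.contains_iff_mem_keys] at h
    simp [PySem.Dict.keys, hnil] at h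
  · simp

theorem pvScanLine_ne_nil (d : PySem.Dict String String) (l : String) (h : d.items ≠ []) :
    (pvScanLine d l).items ≠ [] := by
  unfold pvScanLine
  split
  · exact pvItems_insert_ne_nil d _ _
  · split
    · exact pvItems_insert_ne_nil d _ _
    · exact h

theorem pvScan_ne_nil (ls : List String) : ∀ (d : PySem.Dict String String), d.items ≠ [] →
    (pvScan d ls).items ≠ [] := by
  induction ls with
  | nil => intro d h; exact h
  | cons l rest ih =>
    intro d h
    simpa [pvScan] using ih (pvScanLine d l) (pvScanLine_ne_nil d l h)

theorem pvScan_concat (d : PySem.Dict String String) (ls : List String) (l : String) :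
    pvScan d (ls ++ [l]) = pvScanLine (pvScan d ls) l := by
  simp [pvScan]

theorem pvBridgeTyped (ls : List String) : ∀ (hdr : String) (body : List String),
    (pvCloseA (pvScan (pvTyped hdr) body) ls).map PySem.Dict.items
      = (pvSegsFrom (hdr :: body) ls).map pvSegObj := by
  induction ls with
  | nil =>
    intro hdr body
    have h := pvScan_ne_nil body (pvTyped hdr) (pvItems_insert_ne_nil _ _ _)
    simp only [pvCloseA, pvSegsFrom]
    rw [if_neg h]
    simp [pvSegObj, pvTyped]
  | cons l rest ih =>
    intro hdr body
    simp only [pvCloseA, pvSegsFrom]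
    by_cases ht : PySem.Str.isIn "Object type:" (PySem.Str.strip l) = true
    · have h := pvScan_ne_nil body (pvTyped hdr) (pvItems_insert_ne_nil _ _ _)
      rw [if_pos ht, if_pos ht, if_neg h]
      have hrec := ih (PySem.Str.strip l) []
      simp only [pvScan, List.foldl_nil] at hrec
      simp [pvSegObj, pvTyped]
      exact hrec
    · rw [if_neg ht, if_neg ht, ← pvScan_concat, ih]
      simp

theorem pvBridgePre (ls : List String) : ∀ (pre : List String),
    (pvCloseA (pvScan PySem.Dict.empty pre) ls).map PySem.Dict.items
      = pvBuild (pvSegsFrom pre ls) := by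
  induction ls with
  | nil => intro pre; simp only [pvCloseA, pvSegsFrom, pvBuild]; split <;> simp
  | cons l rest ih =>
    intro pre
    simp only [pvCloseA, pvSegsFrom]
    by_cases ht : PySem.Str.isIn "Object type:" (PySem.Str.strip l) = true
    · rw [if_pos ht, if_pos ht]
      have hrec := pvBridgeTyped rest (PySem.Str.strip l) []
      simp only [pvScan, List.foldl_nil] at hrec
      simp only [pvBuild, List.map_append, hrec]
      split <;> simp
    · rw [if_neg ht, if_neg ht, ← pvScan_concat, ih]

theorem pvSegsFrom_ne_nil (ls : List String) : ∀ (seg : List String), pvSegsFrom seg ls ≠ [] := by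
  induction ls with
  | nil => intro seg; simp [pvSegsFrom]
  | cons l rest ih =>
    intro seg
    simp only [pvSegsFrom]
    split
    · simp
    · exact ih _

theorem pvAltEqBuild (output : String) :
    parse_oleobj_py_alt output = pvBuild (pvSegsFrom [] (pvLines output)) := by
  unfold parse_oleobj_py_alt
  have hfold : (pvLines output).foldl pvAddSeg [[]] = pvSegsFrom [] (pvLines output) := by
    simpa using pvFoldB (pvLines output) [] []
  rw [hfold]
  obtain ⟨pre, rest, hc⟩ := List.exists_cons_of_ne_nil (pvSegsFrom_ne_nil (pvLines output) [])
  rw [hc]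
  simp [pvBuild]

-- ===== VERDICT (by name: the statement is the Claim_ definition above) =====
theorem parse_oleobj_py_spec : Claim_equal_parse_oleobj_py := by
  intro output _
  unfold Spec_parse_oleobj_py parse_oleobj_py
  rw [pvAltEqBuild, pvFoldA (pvLines output) [] PySem.Dict.empty]
  have h := pvBridgePre (pvLines output) []
  simpa [pvScan] using h
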